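-- pv_equiv track=rewrite | github.com/ereinha/SYMBA | SYMBA_REG/SYMBREG_DPO+PIGP_Samyak_Jha/PIGP/model.py | rightmost_operator_pos
-- ===== SOURCE A (Python) =====
-- def rightmost_operator_pos(expr_arr):
--     binary_operators = [16, 17, 18]
--     unary_operators = list(range(19, 47))
--     operators = binary_operators + unary_operators
--
--     for i in reversed(range(len(expr_arr))):
--         if expr_arr[i] in operators:
--             return i
--
--     return -1
-- ===== SOURCE B (Python) =====
-- def rightmost_operator_pos(expr_arr):
--     # single forward pass tracking the last operator index; operators = 16..46 contiguous
--     last = -1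
--     for i, t in enumerate(expr_arr):
--         if 16 <= t <= 46:
--             last = i
--     return last
-- ===== Notes on version B (the rewrite author's own statement) =====
-- stated objective: simpler
-- what changed: Forward single pass with enumerate tracking the last operator index (no early return), with the operator test as the contiguous bounds check 16 <= t <= 46, instead of a reverse index scan with early return over an explicitly built 31-element operator list.
import Mathlib
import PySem

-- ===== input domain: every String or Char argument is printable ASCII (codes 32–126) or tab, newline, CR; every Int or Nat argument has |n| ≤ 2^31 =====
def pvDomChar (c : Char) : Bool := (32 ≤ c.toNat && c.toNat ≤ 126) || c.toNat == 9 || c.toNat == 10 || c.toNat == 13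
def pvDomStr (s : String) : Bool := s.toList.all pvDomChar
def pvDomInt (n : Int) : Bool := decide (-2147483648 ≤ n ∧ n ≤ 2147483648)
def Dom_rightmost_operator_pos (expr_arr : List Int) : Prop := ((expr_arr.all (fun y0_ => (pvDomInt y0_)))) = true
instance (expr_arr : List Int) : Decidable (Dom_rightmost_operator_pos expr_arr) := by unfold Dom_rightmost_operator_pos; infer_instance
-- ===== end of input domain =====

-- B replaces A's reverse scan with early return over a built operator list by a single
-- forward pass tracking the last operator index, testing 16 ≤ t ≤ 46 (objective: simpler).


-- ===== PORT A =====
-- operators = [16, 17, 18] + list(range(19, 47))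
def pvOperators : List Int := [16, 17, 18] ++ PySem.List.pyRange 19 47 1

-- 'for i in reversed(range(len(expr_arr))): if expr_arr[i] in operators: return i' — counts n down from len
def pvScanRev (xs : List Int) : Nat → Int
  | 0 => -1
  | n + 1 => if PySem.List.pyGetD xs (n : Int) 0 ∈ pvOperators then (n : Int) else pvScanRev xs n

def rightmost_operator_pos (expr_arr : List Int) : Int :=
  pvScanRev expr_arr expr_arr.length

-- ===== PORT B =====
-- forward pass: last = i whenever 16 <= t <= 46
def pvScanFwd : List Int → Int → Int → Int
  | [], _, last => last
  | t :: rest, i, last => pvScanFwd rest (i + 1) (if 16 ≤ t ∧ t ≤ 46 then i else last)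

def rightmost_operator_pos_alt (expr_arr : List Int) : Int :=
  pvScanFwd expr_arr 0 (-1)

-- ===== PRECONDITION & SPEC =====
def Spec_rightmost_operator_pos (expr_arr : List Int) (out : Int) : Prop := out = rightmost_operator_pos_alt expr_arr
instance (expr_arr : List Int) (out : Int) : Decidable (Spec_rightmost_operator_pos expr_arr out) := by unfold Spec_rightmost_operator_pos; infer_instance

-- ===== CLAIM (what is proved, stated in full; the proofs are below) =====
def Claim_equal_rightmost_operator_pos : Prop := ∀ (expr_arr : List Int), Dom_rightmost_operator_pos expr_arr → Spec_rightmost_operator_pos expr_arr (rightmost_operator_pos expr_arr)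

-- ===== LEMMAS AND PROOFS =====

theorem mem_pvOperators (t : Int) : t ∈ pvOperators ↔ 16 ≤ t ∧ t ≤ 46 := by
  simp [pvOperators, PySem.List.mem_pyRange_one]
  omega

-- A's scan over the first n elements ignores elements appended beyond n
theorem pvScanRev_append (xs ys : List Int) (n : Nat) (h : n ≤ xs.length) :
    pvScanRev (xs ++ ys) n = pvScanRev xs n := by
  induction n with
  | zero => rfl
  | succ m ih =>
    have hm : m < xs.length := by omega
    have hget : PySem.List.pyGetD (xs ++ ys) (m : Int) 0 = PySem.List.pyGetD xs (m : Int) 0 := by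
      simp [PySem.List.pyGetD_natCast, List.getD_eq_getElem?_getD, List.getElem?_append_left hm]
    simp [pvScanRev, hget, ih (by omega)]

-- B's scan: appending one element overrides 'last' iff it is an operator
theorem pvScanFwd_append (xs : List Int) (t : Int) (i last : Int) :
    pvScanFwd (xs ++ [t]) i last =
      if 16 ≤ t ∧ t ≤ 46 then i + xs.length else pvScanFwd xs i last := by
  induction xs generalizing i last with
  | nil => simp [pvScanFwd]
  | cons x rest ih =>
    show pvScanFwd (rest ++ [t]) (i + 1) (if 16 ≤ x ∧ x ≤ 46 then i else last) = _
    rw [ih]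
    by_cases h : 16 ≤ t ∧ t ≤ 46
    · simp only [if_pos h, List.length_cons]
      push_cast
      ring
    · simp only [if_neg h]
      rfl

theorem scans_agree (xs : List Int) : pvScanRev xs xs.length = pvScanFwd xs 0 (-1) := by
  induction xs using List.reverseRecOn with
  | nil => rfl
  | append_singleton xs t ih =>
    rw [pvScanFwd_append]
    have hlen : (xs ++ [t]).length = xs.length + 1 := by simp
    rw [hlen]
    show pvScanRev (xs ++ [t]) (xs.length + 1) = _
    have hget : PySem.List.pyGetD (xs ++ [t]) (xs.length : Int) 0 = t := by
      simp [PySem.List.pyGetD_natCast, List.getD_eq_getElem?_getD]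
    simp only [pvScanRev, hget, mem_pvOperators,
      pvScanRev_append xs [t] xs.length (le_refl _)]
    split_ifs with h
    · omega
    · exact ih

-- ===== VERDICT (by name: the statement is the Claim_ definition above) =====
theorem rightmost_operator_pos_spec : Claim_equal_rightmost_operator_pos := by
  intro xs _
  unfold Spec_rightmost_operator_pos rightmost_operator_pos rightmost_operator_pos_alt
  exact scans_agree xs
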